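-- pv_equiv track=rewrite | github.com/TechR10n/fomc-agent | src/data_fetchers/datausa_getter.py | _extract_year_range
-- ===== SOURCE A (Python) =====
-- from typing import Any
--
-- def _extract_year_range(records: Any) -> list[int]:
--     if not isinstance(records, list) or not records:
--         return []
--     years: list[int] = []
--     for r in records:
--         if not isinstance(r, dict):
--             continue
--         y = r.get("Year")
--         try:
--             y_int = int(y)
--         except Exception:
--             continue
--         years.append(y_int)
--     if not years:
--         return []
--     return [min(years), max(years)]
-- ===== SOURCE B (Python) =====
-- def _extract_year_range(records):
--     if not isinstance(records, list):
--         return []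
--     lo = hi = None
--     for r in records:
--         if not isinstance(r, dict):
--             continue
--         try:
--             y = int(r.get("Year"))
--         except Exception:
--             continue
--         if lo is None:
--             lo = hi = y
--         else:
--             if y < lo:
--                 lo = y
--             if y > hi:
--                 hi = y
--     return [] if lo is None else [lo, hi]
-- ===== Notes on version B (the rewrite author's own statement) =====
-- stated objective: simpler
-- what changed: Replaces the collect-all-years list plus separate min() and max() passes with a single traversal maintaining running lo/hi extrema (no intermediate list).
import Mathlib
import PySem

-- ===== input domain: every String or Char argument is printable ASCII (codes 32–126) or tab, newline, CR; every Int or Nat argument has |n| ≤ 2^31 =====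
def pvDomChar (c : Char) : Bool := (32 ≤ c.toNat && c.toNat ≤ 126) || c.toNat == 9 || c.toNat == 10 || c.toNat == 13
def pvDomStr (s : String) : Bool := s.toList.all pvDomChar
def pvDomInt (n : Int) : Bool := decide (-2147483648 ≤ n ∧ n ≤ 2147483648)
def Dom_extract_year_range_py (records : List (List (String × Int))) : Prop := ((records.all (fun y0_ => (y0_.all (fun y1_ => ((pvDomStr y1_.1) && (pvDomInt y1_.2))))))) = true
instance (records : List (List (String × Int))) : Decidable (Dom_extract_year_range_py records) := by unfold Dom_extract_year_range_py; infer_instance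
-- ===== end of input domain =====

-- B replaces A's collect-years-then-min-then-max with a single pass keeping running lo/hi extrema (simpler, no intermediate list).


-- ===== PORT A =====
-- step of A's loop: append the record's "Year" value (int(...) succeeds for every present int; a missing key makes int(None) raise and the record is skipped)
def pvStepA (acc : List Int) (r : List (String × Int)) : List Int :=
  match PySem.Dict.get? (PySem.Dict.mk r) "Year" with
  | some y => acc ++ [y]
  | none => acc

def extract_year_range_py (records : List (List (String × Int))) : List Int :=
  if records.isEmpty then []
  else
    let years := records.foldl pvStepA []
    if years.isEmpty then []
    else [(PySem.List.min? years (fun y => y)).getD 0, (PySem.List.max? years (fun y => y)).getD 0]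

-- ===== PORT B =====
-- step of B's loop: update the running (lo, hi) extrema, or seed them from the first valid year
def pvStepB (st : Option (Int × Int)) (r : List (String × Int)) : Option (Int × Int) :=
  match PySem.Dict.get? (PySem.Dict.mk r) "Year" with
  | none => st
  | some y =>
    match st with
    | none => some (y, y)
    | some (lo, hi) => some (if y < lo then y else lo, if hi < y then y else hi)

def extract_year_range_py_alt (records : List (List (String × Int))) : List Int :=
  match records.foldl pvStepB none with
  | none => []
  | some (lo, hi) => [lo, hi]

-- ===== PRECONDITION & SPEC =====
def Spec_extract_year_range_py (records : List (List (String × Int))) (out : List Int) : Prop := out = extract_year_range_py_alt records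
instance (records : List (List (String × Int))) (out : List Int) : Decidable (Spec_extract_year_range_py records out) := by unfold Spec_extract_year_range_py; infer_instance

-- ===== CLAIM (what is proved, stated in full; the proofs are below) =====
def Claim_equal_extract_year_range_py : Prop := ∀ (records : List (List (String × Int))), Dom_extract_year_range_py records → Spec_extract_year_range_py records (extract_year_range_py records)

-- ===== LEMMAS AND PROOFS =====

-- abstraction: the (lo, hi) state B keeps is exactly (min, max) of the list A keeps
def pvAbs : List Int → Option (Int × Int)
  | [] => none
  | x :: t => some (t.foldl min x, t.foldl max x)

theorem pvAbs_step (acc : List Int) (r : List (String × Int)) :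
    pvStepB (pvAbs acc) r = pvAbs (pvStepA acc r) := by
  unfold pvStepA pvStepB
  cases h : PySem.Dict.get? (PySem.Dict.mk r) "Year" with
  | none => rfl
  | some y =>
    cases acc with
    | nil => rfl
    | cons x t =>
      simp only [pvAbs, List.cons_append, List.foldl_append, List.foldl]
      congr 1
      refine Prod.ext ?_ ?_
      · rcases le_or_gt (t.foldl min x) y with h1 | h1
        · simp [min_eq_left h1, not_lt.mpr h1]
        · simp [min_eq_right (le_of_lt h1), h1]
      · rcases le_or_gt y (t.foldl max x) with h1 | h1
        · simp [max_eq_left h1, not_lt.mpr h1]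
        · simp [max_eq_right (le_of_lt h1), h1]

theorem pvFold_abs (records : List (List (String × Int))) (acc : List Int) :
    records.foldl pvStepB (pvAbs acc) = pvAbs (records.foldl pvStepA acc) := by
  induction records generalizing acc with
  | nil => rfl
  | cons r rs ih => simp only [List.foldl, pvAbs_step, ih]

-- ===== VERDICT (by name: the statement is the Claim_ definition above) =====
theorem extract_year_range_py_spec : Claim_equal_extract_year_range_py := by
  intro records _
  unfold Spec_extract_year_range_py extract_year_range_py extract_year_range_py_alt
  have hfold : records.foldl pvStepB none = pvAbs (records.foldl pvStepA []) :=
    pvFold_abs records []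
  cases records with
  | nil => rfl
  | cons r rs =>
    simp only [List.isEmpty_cons, Bool.false_eq_true, if_false, hfold]
    cases hy : (r :: rs).foldl pvStepA [] with
    | nil => rfl
    | cons x t =>
      simp [pvAbs, PySem.List.min?_id_cons, PySem.List.max?_id_cons]
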